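-- pv_equiv track=rewrite | github.com/aratrikghosh2011-tech/numclassify | numclassify.py | is_subfactorial
-- ===== SOURCE A (Python) =====
-- def is_subfactorial(n):
--     def subfact(k):
--         if k == 0: return 1
--         if k == 1: return 0
--         return (k-1)*(subfact(k-1)+subfact(k-2))
--     i = 0
--     while True:
--         s = subfact(i)
--         if s == n: return True
--         if s > n: return False
--         i += 1
-- ===== SOURCE B (Python) =====
-- def is_subfactorial(n):
--     # Iterative recurrence: D(k) = (k-1)*(D(k-1)+D(k-2)), keeping the last two
--     # values instead of recomputing each term by naive double recursion.
--     if n < 0: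
--         return False
--     if n == 0 or n == 1:
--         return True
--     a, b = 0, 1   # D(1), D(2)
--     k = 2
--     while b < n:
--         k += 1
--         a, b = b, (k - 1) * (a + b)
--     return b == n
-- ===== Notes on version B (the rewrite author's own statement) =====
-- stated objective: faster
-- what changed: Replaces the naive exponential double recursion recomputed from scratch for every index with a single incremental loop carrying the last two subfactorial values via D(k)=(k-1)*(D(k-1)+D(k-2)).
-- intended difference: On n = 0, A returns False (its search stops at the first term D(0)=1 > 0 before ever seeing D(1)=0) although 0 is a subfactorial; B returns True, the intended value. — e.g. on is_subfactorial(0): A returns false, B returns true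
import Mathlib
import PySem

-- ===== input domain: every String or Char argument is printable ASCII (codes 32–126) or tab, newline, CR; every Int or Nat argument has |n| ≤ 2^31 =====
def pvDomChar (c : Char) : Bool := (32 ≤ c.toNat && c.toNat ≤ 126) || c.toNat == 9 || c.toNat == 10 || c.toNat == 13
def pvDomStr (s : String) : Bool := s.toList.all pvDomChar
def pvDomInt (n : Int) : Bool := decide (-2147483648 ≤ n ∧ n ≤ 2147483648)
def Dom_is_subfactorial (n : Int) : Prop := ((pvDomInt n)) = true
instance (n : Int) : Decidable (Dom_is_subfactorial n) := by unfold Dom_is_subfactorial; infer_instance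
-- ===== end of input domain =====

-- B replaces A's exponential per-term double recursion by one incremental loop over the
-- subfactorial recurrence; on n = 0, B returns the intended True where A returns False.

-- ===== PORT A =====
-- A's inner subfact: the loop only calls it on i = 0,1,2,…, so the index is a Nat.
def subfact : Nat → Int
  | 0 => 1
  | 1 => 0
  | (k+2) => ((k : Int) + 1) * (subfact (k+1) + subfact k)

-- subfact i ≥ i - 1 and subfact i ≥ 0: needed by loopA's termination proof (cited in decreasing_by).
theorem subfact_ge (i : Nat) : (i : Int) - 1 ≤ subfact i := by
  induction i using Nat.strong_induction_on with
  | _ i ih =>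
    match i with
    | 0 => simp [subfact]
    | 1 => simp [subfact]
    | 2 => simp [subfact]
    | (k+3) =>
      have h1 : ((k+2 : Nat) : Int) - 1 ≤ subfact (k+2) := ih (k+2) (by omega)
      have h2 : ((k+1 : Nat) : Int) - 1 ≤ subfact (k+1) := ih (k+1) (by omega)
      show ((k+3 : Nat) : Int) - 1 ≤ ((k+1 : Int) + 1) * (subfact (k+2) + subfact (k+1))
      push_cast at h1 h2 ⊢
      nlinarith

theorem subfact_nonneg (i : Nat) : 0 ≤ subfact i := by
  cases i with
  | zero => simp [subfact]
  | succ k => have := subfact_ge (k+1); push_cast at this; omega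

-- the 'while True' loop of A, state = i
def loopA (n : Int) (i : Nat) : Bool :=
  if subfact i = n then true
  else if subfact i > n then false
  else loopA n (i+1)
termination_by n.toNat + 2 - i
decreasing_by
  have h := subfact_ge i
  have h0 := subfact_nonneg i
  omega

def is_subfactorial (n : Int) : Bool := loopA n 0

-- ===== PORT B =====
-- B's while loop; fuel only makes the recursion total, it never changes the value
-- reached from is_subfactorial_alt's initial state (proved below).
-- body: k += 1; a, b = b, (k-1)*(a+b)  — with the incremented k, (k+1)-1 = k.
def loopB (fuel : Nat) (n a b : Int) (k : Nat) : Bool :=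
  match fuel with
  | 0 => b = n
  | fuel+1 =>
    if b < n then loopB fuel n b ((k : Int) * (a + b)) (k+1)
    else b = n

def is_subfactorial_alt (n : Int) : Bool :=
  if n < 0 then false
  else if n = 0 || n = 1 then true
  else loopB (n.toNat + 3) n 0 1 2

-- ===== PRECONDITION & SPEC =====
-- On n = 0, A returns False (its search stops at the first term D(0)=1 > 0 before ever
-- seeing D(1)=0) although 0 is a subfactorial; B returns True, the intended value.
def D_is_subfactorial (n : Int) : Prop := n = 0
instance (n : Int) : Decidable (D_is_subfactorial n) := by unfold D_is_subfactorial; infer_instance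

def Spec_is_subfactorial (n : Int) (out : Bool) : Prop := ¬ D_is_subfactorial n → out = is_subfactorial_alt n
instance (n : Int) (out : Bool) : Decidable (Spec_is_subfactorial n out) := by unfold Spec_is_subfactorial; infer_instance

def pvDiffWitness_is_subfactorial : Int := 0
def pvDiffWitnessOut_is_subfactorial : Bool × Bool := (false, true)

-- ===== CLAIM (what is proved, stated in full; the proofs are below) =====
def Claim_unchanged_is_subfactorial : Prop := ∀ (n : Int), Dom_is_subfactorial n → Spec_is_subfactorial n (is_subfactorial n)
def Claim_changed_is_subfactorial : Prop := Dom_is_subfactorial (pvDiffWitness_is_subfactorial) ∧ D_is_subfactorial (pvDiffWitness_is_subfactorial) ∧ is_subfactorial (pvDiffWitness_is_subfactorial) = pvDiffWitnessOut_is_subfactorial.1 ∧ is_subfactorial_alt (pvDiffWitness_is_subfactorial) = pvDiffWitnessOut_is_subfactorial.2 ∧ pvDiffWitnessOut_is_subfactorial.1 ≠ pvDiffWitnessOut_is_subfactorial.2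
def Claim_exact_is_subfactorial : Prop := ∀ (n : Int), Dom_is_subfactorial n → D_is_subfactorial n → is_subfactorial n ≠ is_subfactorial_alt n

-- ===== LEMMAS AND PROOFS =====

-- Core correspondence: from index k ≥ 2 on, A's loop at i = k agrees with B's loop
-- carrying (subfact (k-1), subfact k), for any sufficient fuel.
theorem loopA_eq_loopB (fuel : Nat) :
    ∀ (n : Int) (k : Nat), 2 ≤ k → 2 ≤ n → n.toNat + 2 ≤ fuel + k →
      loopA n k = loopB fuel n (subfact (k-1)) (subfact k) k := by
  induction fuel with
  | zero =>
    intro n k hk hn hf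
    have hge := subfact_ge k
    have : n < subfact k := by omega
    rw [loopA]
    simp [loopB, show subfact k ≠ n by omega, show subfact k > n by omega]
  | succ fuel ih =>
    intro n k hk hn hf
    rw [loopA, loopB]
    by_cases heq : subfact k = n
    · simp [heq]
    · by_cases hgt : subfact k > n
      · simp [heq, hgt, show ¬ subfact k < n by omega]
      · have hlt : subfact k < n := by omega
        have hge := subfact_ge k
        simp only [heq, hgt, hlt, if_false, if_pos]
        have hstep : (k : Int) * (subfact (k-1) + subfact k) = subfact (k+1) := by
          obtain ⟨m, rfl⟩ : ∃ m, k = m + 2 := ⟨k - 2, by omega⟩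
          show ((m+2 : Nat) : Int) * (subfact (m+1) + subfact (m+2)) = subfact (m+3)
          show _ = ((m+1 : Int) + 1) * (subfact (m+2) + subfact (m+1))
          push_cast; ring
        rw [hstep]
        have := ih n (k+1) (by omega) hn (by omega)
        simpa using this

theorem is_subfactorial_spec : Claim_unchanged_is_subfactorial := by
  intro n _ hD
  show is_subfactorial n = is_subfactorial_alt n
  unfold is_subfactorial is_subfactorial_alt
  by_cases hneg : n < 0
  · rw [loopA]
    have : subfact 0 = 1 := rfl
    simp [this, show (1 : Int) ≠ n by omega, show (1 : Int) > n by omega, hneg]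
  · have hn0 : n ≠ 0 := hD
    by_cases h1 : n = 1
    · subst h1
      rw [loopA]
      norm_num [subfact]
    · have hn2 : 2 ≤ n := by omega
      rw [loopA]
      rw [show subfact 0 = 1 from rfl]
      rw [if_neg (by omega), if_neg (by omega)]
      rw [loopA]
      rw [show subfact 1 = 0 from rfl]
      rw [if_neg (by omega), if_neg (by omega)]
      rw [if_neg (by omega), if_neg (by simp [hn0, h1])]
      have := loopA_eq_loopB (n.toNat + 3) n 2 (by omega) hn2 (by omega)
      simpa [show subfact 1 = 0 from rfl, show subfact 2 = 1 from rfl] using this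

-- ===== VERDICT (by name: the statement is the Claim_ definition above) =====
theorem is_subfactorial_at_zero : is_subfactorial 0 = false := by
  unfold is_subfactorial
  rw [loopA]
  norm_num [subfact]

theorem is_subfactorial_changed : Claim_changed_is_subfactorial := by
  unfold Claim_changed_is_subfactorial
  refine ⟨by decide, by decide, is_subfactorial_at_zero, by decide, by decide⟩

theorem is_subfactorial_tight : Claim_exact_is_subfactorial := by
  intro n _ hD
  have : n = 0 := hD
  subst this
  rw [is_subfactorial_at_zero]
  decide
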